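-- pv_equiv track=rewrite | github.com/WXW322/backend | Reverse_Tool/common/Converter/FeatureConVerTer.py | cVertMessageToDict
-- ===== SOURCE A (Python) =====
-- def cVertMessageToDict(words, message):
--     mFeature = []
--     for word in words:
--         if message.find(word) != -1:
--             mFeature.append(words[word])
--         else:
--             mFeature.append(0)
--     return mFeature
-- ===== SOURCE B (Python) =====
-- def cVertMessageToDict(words, message):
--     n = len(message)
--     lengths = {len(w) for w in words}
--     subs = {message[i:i + l] for l in lengths for i in range(n - l + 1)}
--     return [v if w in subs else 0 for w, v in words.items()]
-- ===== Notes on version B (the rewrite author's own statement) =====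
-- stated objective: alternative
-- what changed: Instead of running message.find(word) once per word, B enumerates the distinct word lengths, builds one set of all substrings of the message of exactly those lengths, and answers each word by a single set-membership test.
import Mathlib
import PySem

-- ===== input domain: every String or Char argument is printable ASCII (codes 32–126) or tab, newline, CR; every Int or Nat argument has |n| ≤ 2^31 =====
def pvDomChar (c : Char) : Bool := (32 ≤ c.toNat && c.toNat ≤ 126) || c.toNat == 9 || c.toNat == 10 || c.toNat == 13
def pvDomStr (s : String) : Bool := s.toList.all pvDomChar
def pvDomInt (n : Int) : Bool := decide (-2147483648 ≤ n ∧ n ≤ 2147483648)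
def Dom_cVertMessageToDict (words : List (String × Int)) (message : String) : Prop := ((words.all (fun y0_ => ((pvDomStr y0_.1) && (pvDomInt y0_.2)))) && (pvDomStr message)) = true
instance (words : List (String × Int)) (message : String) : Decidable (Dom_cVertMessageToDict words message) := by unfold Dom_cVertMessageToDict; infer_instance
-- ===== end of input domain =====

-- B replaces per-word message.find scans by one substring set (all substrings of the
-- message of the distinct word lengths), answered by set membership: an alternative
-- algorithm of similar cost, not claimed faster.


-- ===== PORT A =====
-- words is a Python dict: iterate its keys in insertion order; words[word] always
-- succeeds (word is a key), ported as getD with an unused default.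
def cVertMessageToDict (words : List (String × Int)) (message : String) : List Int :=
  let d := PySem.Dict.ofList words
  d.keys.foldl (fun mFeature word =>
    if PySem.Str.find message word ≠ -1 then
      mFeature ++ [d.getD word 0]
    else
      mFeature ++ [0]) []

-- ===== PORT B =====
def cVertMessageToDict_alt (words : List (String × Int)) (message : String) : List Int :=
  let d := PySem.Dict.ofList words
  let n : Int := (message.toList.length : Int)
  let lengths : PySem.Set Int := PySem.Set.ofList (d.keys.map (fun w => ((w.toList.length : Int))))
  let subs : PySem.Set String := PySem.Set.ofList
    (lengths.flatMap (fun l => (PySem.List.pyRange 0 (n - l + 1) 1).map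
      (fun i => PySem.Str.slice message (some i) (some (i + l)))))
  d.items.map (fun wv => if PySem.Set.contains subs wv.1 then wv.2 else 0)

-- ===== PRECONDITION & SPEC =====
def Spec_cVertMessageToDict (words : List (String × Int)) (message : String) (out : List Int) : Prop := out = cVertMessageToDict_alt words message
instance (words : List (String × Int)) (message : String) (out : List Int) : Decidable (Spec_cVertMessageToDict words message out) := by unfold Spec_cVertMessageToDict; infer_instance

-- ===== CLAIM (what is proved, stated in full; the proofs are below) =====
def Claim_equal_cVertMessageToDict : Prop := ∀ (words : List (String × Int)) (message : String), Dom_cVertMessageToDict words message → Spec_cVertMessageToDict words message (cVertMessageToDict words message)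

-- ===== LEMMAS AND PROOFS =====

-- A's loop: both branches append one element.
theorem foldl_ite_append {α β : Type} (p : α → Prop) [DecidablePred p] (f g : α → β)
    (l : List α) (acc : List β) :
    l.foldl (fun a x => if p x then a ++ [f x] else a ++ [g x]) acc
      = acc ++ l.map (fun x => if p x then f x else g x) := by
  induction l generalizing acc with
  | nil => simp
  | cons x xs ih => simp [List.foldl_cons, ih]; split_ifs <;> simp

-- any slice of the message is an infix of it
theorem slice_infix (m : List Char) (i l : Int) (hi : 0 ≤ i) (hl : 0 ≤ i + l) :
    PySem.List.slice m (some i) (some (i + l)) <:+: m := by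
  rw [PySem.List.slice_toNat m hi hl]
  exact ((m.drop i.toNat).take_prefix _).isInfix.trans (m.drop_suffix i.toNat).isInfix

-- an infix of given length is a slice at some admissible position
theorem infix_slice (m w : List Char) (h : w <:+: m) :
    ∃ i : Int, 0 ≤ i ∧ i < (m.length : Int) - (w.length : Int) + 1 ∧
      PySem.List.slice m (some i) (some (i + (w.length : Int))) = w := by
  obtain ⟨s, t, hst⟩ := h
  refine ⟨(s.length : Int), by positivity, ?_, ?_⟩
  · have hle : s.length + w.length ≤ m.length := by
      rw [← hst]; simp [List.length_append]
    omega
  · have := PySem.List.slice_natCast_add m s.length w.length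
    rw [this, ← hst]
    simp

-- ===== VERDICT (by name: the statement is the Claim_ definition above) =====
theorem cVertMessageToDict_spec : Claim_equal_cVertMessageToDict := by
  intro words message _
  unfold Spec_cVertMessageToDict cVertMessageToDict cVertMessageToDict_alt
  simp only []
  set d := PySem.Dict.ofList words with hd
  rw [foldl_ite_append (fun w => PySem.Str.find message w ≠ -1)
        (fun w => d.getD w 0) (fun _ => (0 : Int))]
  simp only [List.nil_append]
  have hkeys : d.keys = d.items.map (·.1) := rfl
  rw [hkeys, List.map_map]
  apply List.map_congr_left
  intro wv hmem
  simp only [Function.comp_apply]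
  rw [← hkeys]
  have hnodup : d.keys.Nodup := PySem.Dict.nodup_keys_ofList words
  have hget : d.getD wv.1 0 = wv.2 := by
    obtain ⟨w, v⟩ := wv
    exact PySem.Dict.getD_of_mem_items d hmem hnodup 0
  have hkey : wv.1 ∈ d.keys := by
    rw [hkeys]; exact List.mem_map_of_mem hmem
  -- the membership test in subs agrees with find ≠ -1
  have hiff : (PySem.Set.contains (PySem.Set.ofList
      ((PySem.Set.ofList (d.keys.map (fun w => ((w.toList.length : Int))))).flatMap
        (fun l => (PySem.List.pyRange 0 ((message.toList.length : Int) - l + 1) 1).map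
          (fun i => PySem.Str.slice message (some i) (some (i + l)))))) wv.1) = true
      ↔ PySem.Str.find message wv.1 ≠ -1 := by
    rw [PySem.Set.contains_iff, PySem.Set.mem_ofList, List.mem_flatMap,
        PySem.Str.find_ne_neg_one_iff]
    constructor
    · rintro ⟨l, hl, hx⟩
      rw [List.mem_map] at hx
      obtain ⟨i, hi, hslice⟩ := hx
      rw [PySem.List.mem_pyRange_one] at hi
      have h0l : (0:Int) ≤ l := by
        rw [PySem.Set.mem_ofList, List.mem_map] at hl
        obtain ⟨w', _, hw'⟩ := hl
        subst hw'; positivity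
      have heq : wv.1.toList = PySem.List.slice message.toList (some i) (some (i + l)) := by
        rw [← hslice, PySem.Str.toList_slice, PySem.Chars.slice_eq_listSlice]
      rw [heq]
      exact slice_infix message.toList i l hi.1 (by omega)
    · intro hinf
      obtain ⟨i, hi0, hilt, hslice⟩ := infix_slice message.toList wv.1.toList hinf
      refine ⟨(wv.1.toList.length : Int), ?_, ?_⟩
      · rw [PySem.Set.mem_ofList, List.mem_map]
        exact ⟨wv.1, hkey, rfl⟩
      · rw [List.mem_map]
        refine ⟨i, ?_, ?_⟩
        · rw [PySem.List.mem_pyRange_one]; exact ⟨hi0, hilt⟩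
        · rw [← String.toList_inj, PySem.Str.toList_slice, PySem.Chars.slice_eq_listSlice]
          exact hslice
  by_cases h : PySem.Str.find message wv.1 ≠ -1
  · rw [if_pos h, hget, if_pos (hiff.mpr h)]
  · rw [if_neg h]
    rw [if_neg (by simp only [hiff]; exact h)]
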